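-- pv_equiv track=rewrite | github.com/ReussDr/GoWTrello | gow_common.py | troops_needed_to_mythic
-- ===== SOURCE A (Python) =====
-- TROOPS_REQ_FOR_ASCENSION = [5, 10, 25, 50, 100]
--
-- def troops_needed_to_mythic(base_rarity, current_rarity, current_count):
--     """
--     Calculate troops needed to ascend to mythic
--
--     :param name:           name of the Troop
--     :param base_rarity:    Original Ascension of the Troop
--     :param current_rarity: Current Ascension Level
--     :param current_count:  Current number of that troop we have
--     :return:               Number of Troops needed to Ascend to Mythic
--     """
--     # First, calculate the total number of that troop we would need if we had 0
--     total_needed = 1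
--     for i in range(0, 6 - base_rarity):
--         total_needed += TROOPS_REQ_FOR_ASCENSION[i]
--
--     # Next, calculate how many troops we've already spent on ascension
--     total_have = current_count
--     for i in range(0, current_rarity - base_rarity):
--         total_have += TROOPS_REQ_FOR_ASCENSION[i]
--
--     # If we have more than we need, return 0, otherwise subtract and return
--     if total_needed <= total_have:
--         return 0
--     return total_needed - total_have
-- ===== SOURCE B (Python) =====
-- TROOPS_REQ_FOR_ASCENSION = [5, 10, 25, 50, 100]
--
-- # Prefix sums: CUM_TROOPS[k] = total troops consumed by the first k ascensions.
-- CUM_TROOPS = [0, 5, 15, 40, 90, 190]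
--
--
-- def _cum(k):
--     """Troops consumed by k ascension steps (0 for k <= 0)."""
--     return CUM_TROOPS[k] if k > 0 else 0
--
--
-- def troops_needed_to_mythic(base_rarity, current_rarity, current_count):
--     total_needed = 1 + _cum(6 - base_rarity)
--     total_have = current_count + _cum(current_rarity - base_rarity)
--     return max(0, total_needed - total_have)
-- ===== Notes on version B (the rewrite author's own statement) =====
-- stated objective: simpler
-- what changed: Replaced both accumulation loops with lookups in a precomputed prefix-sum table of TROOPS_REQ_FOR_ASCENSION and a max(0, ...) return.
import Mathlib
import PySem

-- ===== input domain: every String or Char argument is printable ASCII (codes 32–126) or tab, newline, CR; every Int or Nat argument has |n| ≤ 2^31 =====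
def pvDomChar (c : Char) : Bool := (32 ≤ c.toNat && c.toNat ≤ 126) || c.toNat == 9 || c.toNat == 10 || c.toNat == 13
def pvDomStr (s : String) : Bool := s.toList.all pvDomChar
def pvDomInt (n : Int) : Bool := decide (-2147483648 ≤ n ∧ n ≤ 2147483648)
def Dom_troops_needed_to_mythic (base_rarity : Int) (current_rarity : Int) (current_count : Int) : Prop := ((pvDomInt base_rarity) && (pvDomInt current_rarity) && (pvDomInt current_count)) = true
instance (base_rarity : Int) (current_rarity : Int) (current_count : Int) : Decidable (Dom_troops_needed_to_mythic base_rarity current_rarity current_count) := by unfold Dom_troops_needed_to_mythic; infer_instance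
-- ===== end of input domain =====

-- B replaces A's two accumulation loops by lookups in a precomputed prefix-sum table (objective: simpler).

-- ===== PORT A =====
def troopsReqForAscension : List Int := [5, 10, 25, 50, 100]

-- Inside Pre_ every index is in range, so `.getD 0` (the raising case) never fires.
def troops_needed_to_mythic (base_rarity : Int) (current_rarity : Int) (current_count : Int) : Int :=
  let total_needed := (PySem.List.pyRange 0 (6 - base_rarity) 1).foldl
    (fun acc i => acc + (PySem.List.pyGet? troopsReqForAscension i).getD 0) 1
  let total_have := (PySem.List.pyRange 0 (current_rarity - base_rarity) 1).foldl
    (fun acc i => acc + (PySem.List.pyGet? troopsReqForAscension i).getD 0) current_count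
  if total_needed ≤ total_have then 0 else total_needed - total_have

-- ===== PORT B =====
def cumTroops : List Int := [0, 5, 15, 40, 90, 190]

-- `.getD 0` never fires inside Pre_ (index in range there).
def cumAt (k : Int) : Int := if k > 0 then (PySem.List.pyGet? cumTroops k).getD 0 else 0

def troops_needed_to_mythic_alt (base_rarity : Int) (current_rarity : Int) (current_count : Int) : Int :=
  let total_needed := 1 + cumAt (6 - base_rarity)
  let total_have := current_count + cumAt (current_rarity - base_rarity)
  max 0 (total_needed - total_have)

-- ===== PRECONDITION & SPEC =====
-- Pre_ excludes exactly the inputs on which A raises IndexError: base_rarity ≤ 0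
-- (first loop hits index ≥ 5) or current_rarity - base_rarity ≥ 6 (second loop does).
def Pre_troops_needed_to_mythic (base_rarity : Int) (current_rarity : Int) (current_count : Int) : Prop :=
  1 ≤ base_rarity ∧ current_rarity - base_rarity ≤ 5
instance (base_rarity : Int) (current_rarity : Int) (current_count : Int) : Decidable (Pre_troops_needed_to_mythic base_rarity current_rarity current_count) := by unfold Pre_troops_needed_to_mythic; infer_instance

def pvWitness_troops_needed_to_mythic : Int × Int × Int := (1, 3, 4)

def Spec_troops_needed_to_mythic (base_rarity : Int) (current_rarity : Int) (current_count : Int) (out : Int) : Prop := out = troops_needed_to_mythic_alt base_rarity current_rarity current_count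
instance (base_rarity : Int) (current_rarity : Int) (current_count : Int) (out : Int) : Decidable (Spec_troops_needed_to_mythic base_rarity current_rarity current_count out) := by unfold Spec_troops_needed_to_mythic; infer_instance

-- ===== CLAIM (what is proved, stated in full; the proofs are below) =====
def Claim_equal_troops_needed_to_mythic : Prop := ∀ (base_rarity : Int) (current_rarity : Int) (current_count : Int), Dom_troops_needed_to_mythic base_rarity current_rarity current_count → Pre_troops_needed_to_mythic base_rarity current_rarity current_count → Spec_troops_needed_to_mythic base_rarity current_rarity current_count (troops_needed_to_mythic base_rarity current_rarity current_count)

-- ===== LEMMAS AND PROOFS =====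

-- A's accumulation loop over range(0, n) equals B's prefix-table lookup, for any n ≤ 5.
theorem foldl_troops_eq_cumAt (s n : Int) (hn : n ≤ 5) :
    (PySem.List.pyRange 0 n 1).foldl
      (fun acc i => acc + (PySem.List.pyGet? troopsReqForAscension i).getD 0) s
      = s + cumAt n := by
  rcases lt_or_ge n 1 with h | h
  · have h0 : n ≤ 0 := by omega
    have : PySem.List.pyRange 0 n 1 = [] := by
      simp [PySem.List.pyRange_one]
      omega
    simp [this, cumAt, show ¬ n > 0 by omega]
  · interval_cases n
    · rw [show PySem.List.pyRange 0 1 1 = [0] from by decide]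
      norm_num [cumAt, PySem.List.pyGet?, PySem.List.pyIdx?, troopsReqForAscension, cumTroops]
      try simp only [show ((2:Int).toNat)=2 from rfl, show ((3:Int).toNat)=3 from rfl,
        show ((4:Int).toNat)=4 from rfl, show ((5:Int).toNat)=5 from rfl]
      try norm_num
      try omega
    · rw [show PySem.List.pyRange 0 2 1 = [0, 1] from by decide]
      norm_num [cumAt, PySem.List.pyGet?, PySem.List.pyIdx?, troopsReqForAscension, cumTroops]
      try simp only [show ((2:Int).toNat)=2 from rfl, show ((3:Int).toNat)=3 from rfl,
        show ((4:Int).toNat)=4 from rfl, show ((5:Int).toNat)=5 from rfl]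
      try norm_num
      try omega
    · rw [show PySem.List.pyRange 0 3 1 = [0, 1, 2] from by decide]
      norm_num [cumAt, PySem.List.pyGet?, PySem.List.pyIdx?, troopsReqForAscension, cumTroops]
      try simp only [show ((2:Int).toNat)=2 from rfl, show ((3:Int).toNat)=3 from rfl,
        show ((4:Int).toNat)=4 from rfl, show ((5:Int).toNat)=5 from rfl]
      try norm_num
      try omega
    · rw [show PySem.List.pyRange 0 4 1 = [0, 1, 2, 3] from by decide]
      norm_num [cumAt, PySem.List.pyGet?, PySem.List.pyIdx?, troopsReqForAscension, cumTroops]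
      try simp only [show ((2:Int).toNat)=2 from rfl, show ((3:Int).toNat)=3 from rfl,
        show ((4:Int).toNat)=4 from rfl, show ((5:Int).toNat)=5 from rfl]
      try norm_num
      try omega
    · rw [show PySem.List.pyRange 0 5 1 = [0, 1, 2, 3, 4] from by decide]
      norm_num [cumAt, PySem.List.pyGet?, PySem.List.pyIdx?, troopsReqForAscension, cumTroops]
      try simp only [show ((2:Int).toNat)=2 from rfl, show ((3:Int).toNat)=3 from rfl,
        show ((4:Int).toNat)=4 from rfl, show ((5:Int).toNat)=5 from rfl]
      try norm_num
      try omega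

-- ===== VERDICT (by name: the statement is the Claim_ definition above) =====
theorem troops_needed_to_mythic_spec : Claim_equal_troops_needed_to_mythic := by
  intro b c cc _ hpre
  obtain ⟨hb, hc⟩ := hpre
  unfold Spec_troops_needed_to_mythic troops_needed_to_mythic troops_needed_to_mythic_alt
  rw [foldl_troops_eq_cumAt 1 (6 - b) (by omega),
      foldl_troops_eq_cumAt cc (c - b) (by omega)]
  simp only []
  omega
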